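-- pv_equiv track=rewrite | github.com/nachomohamed/odyssai_jurisprudecias | clarification_loop.py | generate_clarifying_questions
-- ===== SOURCE A (Python) =====
-- from typing import Any, Dict, List, Optional, Tuple
--
-- MAX_QUESTIONS: int = 5
--
-- MIN_QUESTIONS: int = 3
--
-- def _score_feature_impact(missing_feature: str) -> float:
--     """Heurística: Asigna un impacto (0–1) por feature faltante.
--
--     Notas
--     -----
--     - Campos típicos de jurisprudencia con alto impacto en filtrado:
--       * materia, fuero, jurisdiccion, tribunal, anio, tipo_proceso,
--         etapa, tipo_fallo, instancia, sala.
--     - También claves de búsqueda: partes, numero_expediente.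
--     """
--     high = {"materia", "fuero", "jurisdiccion", "tribunal", "anio", "instancia", "sala"}
--     medium = {"tipo_proceso", "etapa", "tipo_fallo", "numero_expediente", "partes"}
--
--     if missing_feature in high:
--         return 1.0
--     if missing_feature in medium:
--         return 0.65
--     return 0.4
--
-- def _question_for_feature(name: str) -> str:
--     """Devuelve una pregunta concreta y no ambigua para un feature dado."""
--     templates = {
--         "materia": "¿La materia es Laboral, Civil, Penal, Comercial, Familia u otra?",
--         "fuero": "¿En qué fuero se tramitó la causa (e.g., laboral, civil, penal)?",
--         "jurisdiccion": "¿Podés precisar la jurisdicción (p. ej., Tucumán, CABA, PBA)?",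
--         "tribunal": "¿Recordás el tribunal o sala (p. ej., Cámara del Trabajo Sala II)?",
--         "instancia": "¿En qué instancia está el fallo (1ª instancia, Cámara, Corte)?",
--         "sala": "Si aplica, ¿qué sala intervino?",
--         "anio": "¿De qué año aproximado es la sentencia (p. ej., 2019–2024)?",
--         "tipo_proceso": "¿Qué tipo de proceso es (despido, daños, alimentos, etc.)?",
--         "tipo_fallo": "¿Qué tipo de resolución buscás (sentencia, auto, medida cautelar)?",
--         "etapa": "¿En qué etapa procesal estaba la causa (p. ej., sentencia definitiva)?",
--         "numero_expediente": "¿Tenés el número de expediente completo o parcial?",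
--         "partes": "¿Recordás al menos un nombre de parte (actor/demandado)?",
--     }
--     return templates.get(name, f"¿Podés precisar el valor de '{name}' para refinar la búsqueda?")
--
-- def generate_clarifying_questions(
--     dudas_priorizadas: List[str],
--     current_features: Dict[str, Any],
--     max_questions: int = MAX_QUESTIONS,
-- ) -> List[str]:
--     """Genera 3–5 preguntas que realmente mejoren el filtrado.
--
--     Parámetros
--     ----------
--     dudas_priorizadas : List[str]
--         Lista de nombres de features (en orden de prioridad) que podrían faltar o
--         necesitar precisión.
--     current_features : Dict[str, Any]
--         Estado actual de features extraídos en la Sección 1.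
--     max_questions : int
--         Máximo de preguntas (por defecto 5).
--
--     Retorna
--     -------
--     List[str]
--         Preguntas concretas y accionables. Entre 3 y 5 si es posible.
--     """
--     missing = []
--     for feat in dudas_priorizadas:
--         val = current_features.get(feat)
--         if val in (None, "", [], {}, "UNKNOWN"):
--             missing.append(feat)
--
--     # Ordenar por impacto
--     missing_sorted = sorted(missing, key=_score_feature_impact, reverse=True)
--     n = max(MIN_QUESTIONS, min(max_questions, len(missing_sorted)))
--
--     questions = [_question_for_feature(name) for name in missing_sorted[:n]]
--     return questions
-- ===== SOURCE B (Python) =====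
-- MAX_QUESTIONS: int = 5
-- MIN_QUESTIONS: int = 3
--
-- def _score_feature_impact(missing_feature: str) -> float:
--     high = {"materia", "fuero", "jurisdiccion", "tribunal", "anio", "instancia", "sala"}
--     medium = {"tipo_proceso", "etapa", "tipo_fallo", "numero_expediente", "partes"}
--     if missing_feature in high:
--         return 1.0
--     if missing_feature in medium:
--         return 0.65
--     return 0.4
--
-- def _question_for_feature(name: str) -> str:
--     templates = {
--         "materia": "¿La materia es Laboral, Civil, Penal, Comercial, Familia u otra?",
--         "fuero": "¿En qué fuero se tramitó la causa (e.g., laboral, civil, penal)?",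
--         "jurisdiccion": "¿Podés precisar la jurisdicción (p. ej., Tucumán, CABA, PBA)?",
--         "tribunal": "¿Recordás el tribunal o sala (p. ej., Cámara del Trabajo Sala II)?",
--         "instancia": "¿En qué instancia está el fallo (1ª instancia, Cámara, Corte)?",
--         "sala": "Si aplica, ¿qué sala intervino?",
--         "anio": "¿De qué año aproximado es la sentencia (p. ej., 2019–2024)?",
--         "tipo_proceso": "¿Qué tipo de proceso es (despido, daños, alimentos, etc.)?",
--         "tipo_fallo": "¿Qué tipo de resolución buscás (sentencia, auto, medida cautelar)?",
--         "etapa": "¿En qué etapa procesal estaba la causa (p. ej., sentencia definitiva)?",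
--         "numero_expediente": "¿Tenés el número de expediente completo o parcial?",
--         "partes": "¿Recordás al menos un nombre de parte (actor/demandado)?",
--     }
--     return templates.get(name, f"¿Podés precisar el valor de '{name}' para refinar la búsqueda?")
--
-- def generate_clarifying_questions(dudas_priorizadas, current_features, max_questions=MAX_QUESTIONS):
--     # One pass: filter missing features directly into three impact buckets
--     # (the impact score takes only three values); concatenating the buckets
--     # reproduces the stable descending sort.
--     high, medium, low = [], [], []
--     for feat in dudas_priorizadas:
--         if current_features.get(feat) in (None, "", [], {}, "UNKNOWN"):
--             s = _score_feature_impact(feat)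
--             if s == 1.0:
--                 high.append(feat)
--             elif s == 0.65:
--                 medium.append(feat)
--             else:
--                 low.append(feat)
--     missing_sorted = high + medium + low
--     n = max(MIN_QUESTIONS, min(max_questions, len(missing_sorted)))
--     return [_question_for_feature(name) for name in missing_sorted[:n]]
-- ===== Notes on version B (the rewrite author's own statement) =====
-- stated objective: alternative
-- what changed: Replaces filter-then-stable-descending-sort with a single pass that files each missing feature into one of three ordered impact buckets (the score takes only the values 1.0/0.65/0.4) and concatenates them, which reproduces the stable sort exactly.
import Mathlib
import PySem

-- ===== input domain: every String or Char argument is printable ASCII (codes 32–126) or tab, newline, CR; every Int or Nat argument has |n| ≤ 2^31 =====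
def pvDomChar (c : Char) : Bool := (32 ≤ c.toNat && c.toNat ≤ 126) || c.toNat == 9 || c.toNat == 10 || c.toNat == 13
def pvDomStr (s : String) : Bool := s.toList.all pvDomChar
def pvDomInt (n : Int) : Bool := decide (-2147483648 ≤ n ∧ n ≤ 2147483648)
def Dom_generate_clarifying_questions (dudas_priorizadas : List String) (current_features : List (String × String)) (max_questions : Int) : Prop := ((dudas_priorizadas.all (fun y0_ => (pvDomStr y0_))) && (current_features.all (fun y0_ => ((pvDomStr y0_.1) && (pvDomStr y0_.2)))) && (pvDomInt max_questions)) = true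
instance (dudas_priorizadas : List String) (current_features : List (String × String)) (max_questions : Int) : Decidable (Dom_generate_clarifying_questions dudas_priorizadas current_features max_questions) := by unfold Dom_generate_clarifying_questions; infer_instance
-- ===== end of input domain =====

-- B replaces the stable descending sort by impact with a single pass that drops each
-- missing feature into one of three ordered buckets (the impact score takes only three
-- values); objective: alternative (one pass instead of filter-then-sort), same result.


-- ===== PORT A =====
-- _score_feature_impact: returns the Python floats 1.0 / 0.65 / 0.4; represented here
-- as the Ints 100 / 65 / 40 (same strict order — the score is only ever compared).
def pvScore (missing_feature : String) : Int :=
  if ["materia", "fuero", "jurisdiccion", "tribunal", "anio", "instancia", "sala"].contains missing_feature then 100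
  else if ["tipo_proceso", "etapa", "tipo_fallo", "numero_expediente", "partes"].contains missing_feature then 65
  else 40

-- 'val in (None, "", [], {}, "UNKNOWN")': values are strings here, so [] and {} can
-- never compare equal; exactly none / "" / "UNKNOWN" match.
def pvMissingVal (val : Option String) : Bool :=
  match val with
  | none => true
  | some s => s == "" || s == "UNKNOWN"

-- _question_for_feature: templates dict + .get with the f-string default.
def pvQuestionFor (name : String) : String :=
  (PySem.Dict.ofList [
    ("materia", "¿La materia es Laboral, Civil, Penal, Comercial, Familia u otra?"),
    ("fuero", "¿En qué fuero se tramitó la causa (e.g., laboral, civil, penal)?"),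
    ("jurisdiccion", "¿Podés precisar la jurisdicción (p. ej., Tucumán, CABA, PBA)?"),
    ("tribunal", "¿Recordás el tribunal o sala (p. ej., Cámara del Trabajo Sala II)?"),
    ("instancia", "¿En qué instancia está el fallo (1ª instancia, Cámara, Corte)?"),
    ("sala", "Si aplica, ¿qué sala intervino?"),
    ("anio", "¿De qué año aproximado es la sentencia (p. ej., 2019–2024)?"),
    ("tipo_proceso", "¿Qué tipo de proceso es (despido, daños, alimentos, etc.)?"),
    ("tipo_fallo", "¿Qué tipo de resolución buscás (sentencia, auto, medida cautelar)?"),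
    ("etapa", "¿En qué etapa procesal estaba la causa (p. ej., sentencia definitiva)?"),
    ("numero_expediente", "¿Tenés el número de expediente completo o parcial?"),
    ("partes", "¿Recordás al menos un nombre de parte (actor/demandado)?")
  ]).getD name ("¿Podés precisar el valor de '" ++ name ++ "' para refinar la búsqueda?")

def generate_clarifying_questions (dudas_priorizadas : List String) (current_features : List (String × String)) (max_questions : Int) : List String :=
  let d := PySem.Dict.ofList current_features
  let missing := dudas_priorizadas.foldl
    (fun acc feat => if pvMissingVal (d.get? feat) then acc ++ [feat] else acc) []
  let missing_sorted := PySem.List.sorted missing pvScore true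
  let n : Int := max 3 (min max_questions (missing_sorted.length : Int))
  (PySem.List.slice missing_sorted none (some n)).map pvQuestionFor

-- ===== PORT B =====
-- the body of B's single loop: file the feature into its impact bucket (named so the
-- proofs can speak about one step; it is exactly the loop body of Source B)
def pvBucketStep (d : PySem.Dict String String)
    (acc : List String × List String × List String) (feat : String) :
    List String × List String × List String :=
  if pvMissingVal (d.get? feat) then
    let s := pvScore feat
    if s == 100 then (acc.1 ++ [feat], acc.2.1, acc.2.2)
    else if s == 65 then (acc.1, acc.2.1 ++ [feat], acc.2.2)
    else (acc.1, acc.2.1, acc.2.2 ++ [feat])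
  else acc

def generate_clarifying_questions_alt (dudas_priorizadas : List String) (current_features : List (String × String)) (max_questions : Int) : List String :=
  let d := PySem.Dict.ofList current_features
  let buckets := dudas_priorizadas.foldl (pvBucketStep d) ([], [], [])
  let missing_sorted := buckets.1 ++ buckets.2.1 ++ buckets.2.2
  let n : Int := max 3 (min max_questions (missing_sorted.length : Int))
  (PySem.List.slice missing_sorted none (some n)).map pvQuestionFor

-- ===== PRECONDITION & SPEC =====
def Spec_generate_clarifying_questions (dudas_priorizadas : List String) (current_features : List (String × String)) (max_questions : Int) (out : List String) : Prop := out = generate_clarifying_questions_alt dudas_priorizadas current_features max_questions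
instance (dudas_priorizadas : List String) (current_features : List (String × String)) (max_questions : Int) (out : List String) : Decidable (Spec_generate_clarifying_questions dudas_priorizadas current_features max_questions out) := by unfold Spec_generate_clarifying_questions; infer_instance

-- ===== CLAIM (what is proved, stated in full; the proofs are below) =====
def Claim_equal_generate_clarifying_questions : Prop := ∀ (dudas_priorizadas : List String) (current_features : List (String × String)) (max_questions : Int), Dom_generate_clarifying_questions dudas_priorizadas current_features max_questions → Spec_generate_clarifying_questions dudas_priorizadas current_features max_questions (generate_clarifying_questions dudas_priorizadas current_features max_questions)

-- ===== LEMMAS AND PROOFS =====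

-- the score takes only three values
theorem pvScore_cases (x : String) : pvScore x = 100 ∨ pvScore x = 65 ∨ pvScore x = 40 := by
  unfold pvScore; split_ifs <;> simp

-- skip a prefix no element of which triggers the insertion predicate
theorem insertBy_append_of_forall_not_before {α : Type} (before : α → α → Bool) (x : α)
    (h t : List α) (hh : ∀ y ∈ h, before x y = false) :
    PySem.List.insertBy before x (h ++ t) = h ++ PySem.List.insertBy before x t := by
  induction h with
  | nil => simp
  | cons a as ih =>
    have ha : before x a = false := hh a (by simp)
    have : ∀ y ∈ as, before x y = false := fun y hy => hh y (by simp [hy])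
    simp [PySem.List.insertBy, ha, ih this]

-- insert at the very front when the head (if any) triggers the predicate
theorem insertBy_cons_self {α : Type} (before : α → α → Bool) (x : α) (t : List α)
    (hh : ∀ (z : α) (zs : List α), t = z :: zs → before x z = true) :
    PySem.List.insertBy before x t = x :: t := by
  cases t with
  | nil => simp [PySem.List.insertBy]
  | cons z zs => simp [PySem.List.insertBy, hh z zs rfl]

-- score of a member of a score-k filter
theorem score_of_mem_filter {k : Int} {y : String} {xs : List String}
    (hy : y ∈ xs.filter (fun x => pvScore x == k)) : pvScore y = k := by
  have := List.of_mem_filter hy; simpa using this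

-- stable descending sort by the three-valued score = concatenation of the three buckets
theorem sorted_eq_buckets (xs : List String) :
    PySem.List.sorted xs pvScore true =
      xs.filter (fun x => pvScore x == 100) ++ xs.filter (fun x => pvScore x == 65)
        ++ xs.filter (fun x => pvScore x == 40) := by
  rw [PySem.List.sorted_rev_eq_foldl_insertBy]
  induction xs using List.reverseRecOn with
  | nil => simp
  | append_singleton xs x ih =>
    rw [List.foldl_append, List.foldl_cons, List.foldl_nil, ih, List.append_assoc]
    have hfilter : ∀ (k : Int), (xs ++ [x]).filter (fun y => pvScore y == k)
        = xs.filter (fun y => pvScore y == k) ++ if pvScore x == k then [x] else [] := by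
      intro k; by_cases h : pvScore x == k <;> simp [List.filter_append, h]
    rcases pvScore_cases x with hx | hx | hx
    · -- x ends the 100-bucket, before everything of score 65 / 40
      rw [insertBy_append_of_forall_not_before _ _ _ _ (by
          intro y hy; have := score_of_mem_filter hy; simp [this, hx]),
        insertBy_cons_self _ _ _ (by
          intro z zs hzzs
          have hz : z ∈ xs.filter (fun y => pvScore y == 65) ++ xs.filter (fun y => pvScore y == 40) :=
            hzzs ▸ List.mem_cons_self ..
          rcases List.mem_append.mp hz with h | h <;>
            · have := score_of_mem_filter h; simp [this, hx])]
      simp [hfilter, hx, List.append_assoc]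
    · -- x ends the 65-bucket
      rw [insertBy_append_of_forall_not_before _ _ _ _ (by
          intro y hy; have := score_of_mem_filter hy; simp [this, hx]),
        insertBy_append_of_forall_not_before _ _ _ _ (by
          intro y hy; have := score_of_mem_filter hy; simp [this, hx]),
        insertBy_cons_self _ _ _ (by
          intro z zs hzzs
          have hz := score_of_mem_filter (hzzs ▸ List.mem_cons_self ..)
          simp [hz, hx])]
      simp [hfilter, hx, List.append_assoc]
    · -- x goes to the very end
      rw [PySem.List.insertBy_of_forall_not_before _ _ _ (by
        intro y hy
        simp only [List.mem_append] at hy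
        rcases hy with hy | hy | hy <;>
          · have := score_of_mem_filter hy; simp [this, hx])]
      simp [hfilter, hx, List.append_assoc]

-- one step of B's loop, by case on the feature
theorem pvBucketStep_not_missing (d : PySem.Dict String String) (acc) (feat : String)
    (hm : ¬ pvMissingVal (d.get? feat)) : pvBucketStep d acc feat = acc := by
  simp [pvBucketStep, hm]

-- B's one-pass fold computes the three filtered buckets of A's missing list
theorem foldB_eq (d : PySem.Dict String String) (dudas : List String)
    (acc : List String × List String × List String) :
    dudas.foldl (pvBucketStep d) acc =
      (acc.1 ++ ((dudas.filter (fun f => pvMissingVal (d.get? f))).filter (fun x => pvScore x == 100)),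
       acc.2.1 ++ ((dudas.filter (fun f => pvMissingVal (d.get? f))).filter (fun x => pvScore x == 65)),
       acc.2.2 ++ ((dudas.filter (fun f => pvMissingVal (d.get? f))).filter (fun x => pvScore x == 40))) := by
  induction dudas generalizing acc with
  | nil => simp
  | cons a as ih =>
    rw [List.foldl_cons]
    by_cases hm : pvMissingVal (d.get? a)
    · rcases pvScore_cases a with hx | hx | hx
      · rw [show pvBucketStep d acc a = (acc.1 ++ [a], acc.2.1, acc.2.2) from by
            simp [pvBucketStep, hm, hx], ih]
        simp [hm, hx]
      · rw [show pvBucketStep d acc a = (acc.1, acc.2.1 ++ [a], acc.2.2) from by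
            simp [pvBucketStep, hm, hx], ih]
        simp [hm, hx]
      · rw [show pvBucketStep d acc a = (acc.1, acc.2.1, acc.2.2 ++ [a]) from by
            simp [pvBucketStep, hm, hx], ih]
        simp [hm, hx]
    · rw [pvBucketStep_not_missing d acc a hm, ih]
      simp [hm]

-- ===== VERDICT (by name: the statement is the Claim_ definition above) =====
theorem generate_clarifying_questions_spec : Claim_equal_generate_clarifying_questions := by
  intro dudas cf mq _
  unfold Spec_generate_clarifying_questions
  show generate_clarifying_questions dudas cf mq = generate_clarifying_questions_alt dudas cf mq
  unfold generate_clarifying_questions generate_clarifying_questions_alt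
  dsimp only
  rw [foldB_eq]
  have hA : (dudas.foldl
      (fun acc feat => if pvMissingVal ((PySem.Dict.ofList cf).get? feat) then acc ++ [feat] else acc)
      ([] : List String)) =
      dudas.filter (fun f => pvMissingVal ((PySem.Dict.ofList cf).get? f)) := by
    simpa using PySem.List.foldl_append_if
      (fun f => pvMissingVal ((PySem.Dict.ofList cf).get? f)) (fun x => x) dudas []
  rw [hA, sorted_eq_buckets]
  simp
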